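-- pv_equiv track=rewrite | github.com/blosadas/ALP-Discretas1 | operator_precedence.py | to_ast
-- ===== SOURCE A (Python) =====
-- BINARY_OPERATORS = {'vee', 'wedge', 'rightarrow', 'leftrightarrow'}
--
-- UNARY_OPERATORS = {'neg'}
--
-- OPERANDS = {'p', 'q', 'r'}
--
-- ALL_OPERATORS = BINARY_OPERATORS.union(UNARY_OPERATORS)
--
-- def to_ast(tokens, precedence):
--     def has_greater_or_equal_prec(op1, op2):
--         # op1 es el operador en la pila, op2 es el nuevo operador
--         return precedence.get(op1, {}).get(op2, '') in {'>', '='}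
--
--     output = []
--     ops = []
--
--     i = 0
--     while i < len(tokens):
--         token = tokens[i]
--         if token in OPERANDS:
--             output.append(token)
--         elif token in ALL_OPERATORS:
--             while ops and ops[-1] in ALL_OPERATORS and has_greater_or_equal_prec(ops[-1], token):
--                 output.append(ops.pop())
--             ops.append(token)
--         i += 1
--
--     while ops:
--         output.append(ops.pop())
--
--     # Reconstruir el árbol desde la notación postfija
--     stack = []
--     for token in output:
--         if token in OPERANDS:
--             stack.append(token)
--         elif token in UNARY_OPERATORS:
--             operand = stack.pop()
--             stack.append(f"\\neg ({operand})")
--         elif token in BINARY_OPERATORS: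
--             right = stack.pop()
--             left = stack.pop()
--             if token == 'vee':
--                 stack.append(f"({left} \\vee {right})")
--             elif token == 'wedge':
--                 stack.append(f"({left} \\wedge {right})")
--             elif token == 'rightarrow':
--                 stack.append(f"({left} \\rightarrow {right})")
--             elif token == 'leftrightarrow':
--                 stack.append(f"({left} \\leftrightarrow {right})")
--     return stack[0]
-- ===== SOURCE B (Python) =====
-- BINARY_OPERATORS = {'vee', 'wedge', 'rightarrow', 'leftrightarrow'}
--
-- UNARY_OPERATORS = {'neg'}
--
-- OPERANDS = {'p', 'q', 'r'}
--
-- ALL_OPERATORS = BINARY_OPERATORS.union(UNARY_OPERATORS)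
--
-- def to_ast(tokens, precedence):
--     # Single fused pass: apply each operator the moment the shunting yard
--     # would emit it, onto a stack of already-built LaTeX fragments.
--     # No intermediate postfix list is ever built.
--     def has_greater_or_equal_prec(op1, op2):
--         return precedence.get(op1, {}).get(op2, '') in {'>', '='}
--
--     def apply_op(op, stack):
--         if op in UNARY_OPERATORS:
--             x = stack.pop()
--             stack.append(f"\\neg ({x})")
--         elif op in BINARY_OPERATORS:
--             right = stack.pop()
--             left = stack.pop()
--             if op == 'vee':
--                 stack.append(f"({left} \\vee {right})")
--             elif op == 'wedge':
--                 stack.append(f"({left} \\wedge {right})")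
--             elif op == 'rightarrow':
--                 stack.append(f"({left} \\rightarrow {right})")
--             elif op == 'leftrightarrow':
--                 stack.append(f"({left} \\leftrightarrow {right})")
--
--     stack = []
--     ops = []
--     for token in tokens:
--         if token in OPERANDS:
--             stack.append(token)
--         elif token in ALL_OPERATORS:
--             while ops and has_greater_or_equal_prec(ops[-1], token):
--                 apply_op(ops.pop(), stack)
--             ops.append(token)
--     while ops:
--         apply_op(ops.pop(), stack)
--     return stack[0]
-- ===== Notes on version B (the rewrite author's own statement) =====
-- stated objective: alternative
-- what changed: B fuses A's two phases into a single pass: each operator is applied to a stack of already-built LaTeX fragments the moment the shunting yard would emit it, so the intermediate postfix list and the second reconstruction loop disappear.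
-- outside the precondition, e.g. on to_ast(['p', 'q', 'vee'], {}): A returns '(p \\vee q)', B returns '(p \\vee q)'; on to_ast(['neg', 'p'], {'vee': {'neg': '>'}}): A returns '\\neg (p)', B returns '\\neg (p)'
import Mathlib
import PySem

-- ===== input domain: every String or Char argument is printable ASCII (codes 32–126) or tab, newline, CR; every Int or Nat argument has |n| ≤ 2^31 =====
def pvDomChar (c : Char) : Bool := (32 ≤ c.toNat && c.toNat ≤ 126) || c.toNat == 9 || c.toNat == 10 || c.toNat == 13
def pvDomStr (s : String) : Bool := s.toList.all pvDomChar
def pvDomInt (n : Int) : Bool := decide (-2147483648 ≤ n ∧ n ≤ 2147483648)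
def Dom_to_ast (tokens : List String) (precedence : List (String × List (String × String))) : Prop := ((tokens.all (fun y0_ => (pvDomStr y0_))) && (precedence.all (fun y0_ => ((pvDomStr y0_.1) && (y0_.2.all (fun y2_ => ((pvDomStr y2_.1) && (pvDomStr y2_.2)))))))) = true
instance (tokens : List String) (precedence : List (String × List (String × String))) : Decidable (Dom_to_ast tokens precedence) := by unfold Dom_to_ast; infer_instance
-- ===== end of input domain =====

-- B fuses A's two phases into one pass: each operator is applied to a fragment
-- stack the moment the shunting yard would emit it, so no intermediate postfix
-- list is ever built (objective: alternative decomposition, same cost).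

-- module-level constants (Python sets of string literals)
def pvOPN : List String := ["p", "q", "r"]
def pvUN : List String := ["neg"]
def pvBIN : List String := ["vee", "wedge", "rightarrow", "leftrightarrow"]
def pvALL : List String := ["vee", "wedge", "rightarrow", "leftrightarrow", "neg"]

-- precedence.get(op1, {}).get(op2, '') in {'>', '='}
def pvHasGE (prec : List (String × List (String × String))) (o t : String) : Bool :=
  let s := PySem.Dict.getD (PySem.Dict.mk (PySem.Dict.getD (PySem.Dict.mk prec) o [])) t ""
  s == ">" || s == "="

-- ===== PORT A =====
-- the inner while loop popping ops with >= precedence into the output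
def opsPopA (prec : List (String × List (String × String))) (t : String) :
    List String → List String × List String
  | [] => ([], [])
  | o :: rest =>
    if o ∈ pvALL ∧ pvHasGE prec o t = true then
      let pr := opsPopA prec t rest
      (o :: pr.1, pr.2)
    else ([], o :: rest)

-- body of A's first while loop (one token); state = (output, ops), ops head = top
def stepA (prec : List (String × List (String × String)))
    (s : List String × List String) (t : String) : List String × List String :=
  if t ∈ pvOPN then (s.1 ++ [t], s.2)
  else if t ∈ pvALL then
    let pr := opsPopA prec t s.2
    (s.1 ++ pr.1, t :: pr.2)
  else s

-- body of A's postfix-reconstruction loop (stack head = top; Python's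
-- stack.pop() on an empty stack raises — those inputs are outside Pre_, the
-- port returns [] there)
def evalTokA (s : List String) (t : String) : List String :=
  if t ∈ pvOPN then t :: s
  else if t ∈ pvUN then
    match s with
    | x :: r => ("\\neg (" ++ x ++ ")") :: r
    | [] => []
  else if t ∈ pvBIN then
    match s with
    | r :: l :: rest =>
      if t = "vee" then ("(" ++ l ++ " \\vee " ++ r ++ ")") :: rest
      else if t = "wedge" then ("(" ++ l ++ " \\wedge " ++ r ++ ")") :: rest
      else if t = "rightarrow" then ("(" ++ l ++ " \\rightarrow " ++ r ++ ")") :: rest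
      else if t = "leftrightarrow" then ("(" ++ l ++ " \\leftrightarrow " ++ r ++ ")") :: rest
      else rest
    | _ => []
  else s

-- stack[0] = bottom of the stack = last element of the head-is-top list
def to_ast (tokens : List String) (precedence : List (String × List (String × String))) : String :=
  let st := tokens.foldl (stepA precedence) ([], [])
  let output := st.1 ++ st.2      -- final flush: while ops: output.append(ops.pop())
  let stack := output.foldl evalTokA []
  (stack.getLast?).getD ""        -- Python stack[0]; raises if empty (outside Pre_)

-- ===== PORT B =====
-- apply_op: apply one operator to the fragment stack (head = top)
def applyB (o : String) (s : List String) : List String :=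
  if o ∈ pvUN then
    match s with
    | x :: r => ("\\neg (" ++ x ++ ")") :: r
    | [] => []
  else if o ∈ pvBIN then
    match s with
    | r :: l :: rest =>
      if o = "vee" then ("(" ++ l ++ " \\vee " ++ r ++ ")") :: rest
      else if o = "wedge" then ("(" ++ l ++ " \\wedge " ++ r ++ ")") :: rest
      else if o = "rightarrow" then ("(" ++ l ++ " \\rightarrow " ++ r ++ ")") :: rest
      else if o = "leftrightarrow" then ("(" ++ l ++ " \\leftrightarrow " ++ r ++ ")") :: rest
      else rest
    | _ => []
  else s

-- B's inner while loop: pop ops with >= precedence and apply them at once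
def popApplyB (prec : List (String × List (String × String))) (t : String) :
    List String → List String → List String × List String
  | stack, [] => (stack, [])
  | stack, o :: rest =>
    if pvHasGE prec o t = true then popApplyB prec t (applyB o stack) rest
    else (stack, o :: rest)

-- body of B's single for loop; state = (fragment stack, ops)
def stepB (prec : List (String × List (String × String)))
    (s : List String × List String) (t : String) : List String × List String :=
  if t ∈ pvOPN then (t :: s.1, s.2)
  else if t ∈ pvALL then
    let pr := popApplyB prec t s.1 s.2
    (pr.1, t :: pr.2)
  else s

def to_ast_alt (tokens : List String) (precedence : List (String × List (String × String))) : String :=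
  let st := tokens.foldl (stepB precedence) ([], [])
  let stack := st.2.foldl (fun s o => applyB o s) st.1   -- while ops: apply_op(ops.pop(), stack)
  (stack.getLast?).getD ""        -- Python stack[0]; raises if empty (outside Pre_)

-- ===== PRECONDITION & SPEC =====
-- skeleton check over the operand/binary-operator subsequence ('neg' and
-- unknown tokens are skipped): operand (binop operand)* sequences, never a
-- binop while an operand is still expected, ending with an operand seen
def pvSkel (need : Bool) : List String → Bool
  | [] => !need
  | t :: rest =>
    if t ∈ (["p", "q", "r"] : List String) then pvSkel false rest
    else if t ∈ (["vee", "wedge", "rightarrow", "leftrightarrow"] : List String) then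
      (if need then false else pvSkel true rest)
    else pvSkel need rest

-- Pre_ excludes exactly the inputs on which the evaluation stack can underflow or
-- end empty (there A raises IndexError): it is a conservative closed-form safety
-- condition — the binary skeleton must be well formed and, when 'neg' occurs, no
-- operator may be ranked '>' or '=' over 'neg' — so a few malformed-but-lucky
-- inputs on which A still returns are excluded too (B returns the same value there).
def Pre_to_ast (tokens : List String) (precedence : List (String × List (String × String))) : Prop :=
  pvSkel true tokens = true ∧
  ("neg" ∈ tokens →
    ∀ x ∈ (["vee", "wedge", "rightarrow", "leftrightarrow", "neg"] : List String),
      ¬ (PySem.Dict.getD (PySem.Dict.mk (PySem.Dict.getD (PySem.Dict.mk precedence) x [])) "neg" "" = ">" ∨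
         PySem.Dict.getD (PySem.Dict.mk (PySem.Dict.getD (PySem.Dict.mk precedence) x [])) "neg" "" = "="))
instance (tokens : List String) (precedence : List (String × List (String × String))) : Decidable (Pre_to_ast tokens precedence) := by unfold Pre_to_ast; infer_instance

def pvWitness_to_ast : List String × (List (String × List (String × String))) :=
  (["neg", "p", "vee", "q"], [("vee", [("vee", ">")])])

def Spec_to_ast (tokens : List String) (precedence : List (String × List (String × String))) (out : String) : Prop := out = to_ast_alt tokens precedence
instance (tokens : List String) (precedence : List (String × List (String × String))) (out : String) : Decidable (Spec_to_ast tokens precedence out) := by unfold Spec_to_ast; infer_instance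

-- ===== CLAIM (what is proved, stated in full; the proofs are below) =====
def Claim_equal_to_ast : Prop := ∀ (tokens : List String) (precedence : List (String × List (String × String))), Dom_to_ast tokens precedence → Pre_to_ast tokens precedence → Spec_to_ast tokens precedence (to_ast tokens precedence)

-- ===== LEMMAS AND PROOFS =====

-- on operators, B's apply_op computes exactly A's postfix-evaluation step
theorem applyB_eq_evalTokA (o : String) (ho : o ∈ pvALL) (s : List String) :
    applyB o s = evalTokA s o := by
  fin_cases ho <;> simp [applyB, evalTokA, pvOPN, pvUN, pvBIN]

theorem opsPopA_rest_all (prec : List (String × List (String × String))) (t : String)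
    (ops : List String) (h : ∀ o ∈ ops, o ∈ pvALL) :
    ∀ o ∈ (opsPopA prec t ops).2, o ∈ pvALL := by
  induction ops with
  | nil => simp [opsPopA]
  | cons o rest ih =>
    simp only [opsPopA]
    split
    · exact ih fun x hx => h x (List.mem_cons_of_mem _ hx)
    · exact h

-- popping-and-applying at once = popping into the postfix output, then evaluating
theorem popApplyB_eq (prec : List (String × List (String × String))) (t : String)
    (ops : List String) (h : ∀ o ∈ ops, o ∈ pvALL) (out : List String) :
    popApplyB prec t (out.foldl evalTokA []) ops =
      ((out ++ (opsPopA prec t ops).1).foldl evalTokA [], (opsPopA prec t ops).2) := by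
  induction ops generalizing out with
  | nil => simp [popApplyB, opsPopA]
  | cons o rest ih =>
    have ho : o ∈ pvALL := h o List.mem_cons_self
    have hrest : ∀ x ∈ rest, x ∈ pvALL := fun x hx => h x (List.mem_cons_of_mem _ hx)
    by_cases hge : pvHasGE prec o t = true
    · simp only [popApplyB, opsPopA, if_pos hge, if_pos (And.intro ho hge)]
      have hstep : applyB o (out.foldl evalTokA []) = (out ++ [o]).foldl evalTokA [] := by
        rw [List.foldl_append]
        simp [applyB_eq_evalTokA o ho]
      rw [hstep, ih hrest (out ++ [o])]
      simp
    · simp [popApplyB, opsPopA, hge]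

-- main loop invariant: B's fragment stack is the evaluation of A's output list,
-- the operator stacks coincide, and the operator stack holds only operators
theorem loop_eq (prec : List (String × List (String × String))) (toks : List String)
    (out ops : List String) (h : ∀ o ∈ ops, o ∈ pvALL) :
    (toks.foldl (stepB prec) (out.foldl evalTokA [], ops)).1 =
      ((toks.foldl (stepA prec) (out, ops)).1).foldl evalTokA [] ∧
    (toks.foldl (stepB prec) (out.foldl evalTokA [], ops)).2 =
      (toks.foldl (stepA prec) (out, ops)).2 ∧
    (∀ o ∈ (toks.foldl (stepA prec) (out, ops)).2, o ∈ pvALL) := by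
  induction toks generalizing out ops with
  | nil => exact ⟨rfl, rfl, h⟩
  | cons t rest ih =>
    simp only [List.foldl_cons]
    by_cases hopn : t ∈ pvOPN
    · have hstep : stepB prec (out.foldl evalTokA [], ops) t =
          ((out ++ [t]).foldl evalTokA [], ops) := by
        rw [List.foldl_append]
        simp [stepB, evalTokA, hopn]
      have hstepA : stepA prec (out, ops) t = (out ++ [t], ops) := by
        simp [stepA, hopn]
      rw [hstep, hstepA]
      exact ih (out ++ [t]) ops h
    · by_cases hall : t ∈ pvALL
      · have hstepA : stepA prec (out, ops) t =
            (out ++ (opsPopA prec t ops).1, t :: (opsPopA prec t ops).2) := by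
          simp [stepA, hopn, hall]
        have hstep : stepB prec (out.foldl evalTokA [], ops) t =
            ((out ++ (opsPopA prec t ops).1).foldl evalTokA [], t :: (opsPopA prec t ops).2) := by
          simp [stepB, hopn, hall, popApplyB_eq prec t ops h out]
        rw [hstep, hstepA]
        refine ih _ _ ?_
        intro o hmem
        rcases List.mem_cons.mp hmem with rfl | hmem
        · exact hall
        · exact opsPopA_rest_all prec t ops h o hmem
      · have h1 : stepA prec (out, ops) t = (out, ops) := by simp [stepA, hopn, hall]
        have h2 : stepB prec (out.foldl evalTokA [], ops) t = (out.foldl evalTokA [], ops) := by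
          simp [stepB, hopn, hall]
        rw [h1, h2]
        exact ih out ops h

-- flushing B's operator stack = appending it to A's output, then evaluating
theorem flush_eq (ops : List String) (h : ∀ o ∈ ops, o ∈ pvALL) (out : List String) :
    ops.foldl (fun s o => applyB o s) (out.foldl evalTokA []) =
      (out ++ ops).foldl evalTokA [] := by
  induction ops generalizing out with
  | nil => simp
  | cons o rest ih =>
    have ho : o ∈ pvALL := h o List.mem_cons_self
    have hrest : ∀ x ∈ rest, x ∈ pvALL := fun x hx => h x (List.mem_cons_of_mem _ hx)
    simp only [List.foldl_cons]
    have hstep : applyB o (out.foldl evalTokA []) = (out ++ [o]).foldl evalTokA [] := by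
      rw [List.foldl_append]
      simp [applyB_eq_evalTokA o ho]
    rw [hstep, ih hrest (out ++ [o])]
    simp

-- the two ports agree on every input
theorem main_eq (tokens : List String) (precedence : List (String × List (String × String))) :
    to_ast tokens precedence = to_ast_alt tokens precedence := by
  obtain ⟨h1, h2, h3⟩ := loop_eq precedence tokens [] [] (by simp)
  simp only [List.foldl_nil] at h1 h2
  show ((((tokens.foldl (stepA precedence) ([], [])).1 ++
          (tokens.foldl (stepA precedence) ([], [])).2).foldl evalTokA []).getLast?).getD "" =
      (((tokens.foldl (stepB precedence) ([], [])).2.foldl (fun s o => applyB o s)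
          (tokens.foldl (stepB precedence) ([], [])).1).getLast?).getD ""
  rw [h1, h2, flush_eq _ h3]

-- ===== VERDICT (by name: the statement is the Claim_ definition above) =====
theorem to_ast_spec : Claim_equal_to_ast := by
  intro tokens precedence _ _
  unfold Spec_to_ast
  exact main_eq tokens precedence
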